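-- pv_equiv track=rewrite | github.com/elle-art/StewartD | code/ContactBook/starter_code/contact_book.py | delete_contact
-- ===== SOURCE A (Python) =====
-- def find_by_phone(contacts, phone):
--     """
--     Find a contact by exact phone number.
--
--     Returns:
--         The contact dictionary if found, None otherwise
--     """
--     # TODO: Search for contact with matching phone
--     for contact in contacts:
--         if phone == contact["phone"]:
--             return contact
--
--     return None # number not found in contact book
--
-- def delete_contact(contacts, phone):
--     """
--     Delete a contact by phone number.
--
--     Returns:
--         True if deleted, False if not found
--     """
--     # TODO: Find and remove contact with matching phone
--     # Find contact by phone
--     contact = find_by_phone(contacts, phone)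
--
--     if contact is None:
--         return False
--
--     # TODO: Update the specified field
--     for i, contact in enumerate(contacts, start = 0):
--         if phone == contact["phone"]:
--             contacts.pop(i)
--             return True
--
--     # TODO: Return success/failure
--     return True
-- ===== SOURCE B (Python) =====
-- def delete_contact(contacts, phone):
--     """
--     Delete a contact by phone number.
--
--     Returns:
--         True if deleted, False if not found
--     """
--     kept = []
--     deleted = False
--     for contact in contacts:
--         if not deleted and phone == contact["phone"]:
--             deleted = True
--         else:
--             kept.append(contact)
--     contacts[:] = kept
--     return deleted
-- ===== Notes on version B (the rewrite author's own statement) =====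
-- stated objective: alternative
-- what changed: B replaces A's find-then-enumerate-and-pop structure by one rebuild pass: it folds the list into a kept-accumulator plus a deleted flag, dropping the first match, then assigns contacts[:] = kept; no helper call, no pop, no early return.
import Mathlib
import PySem

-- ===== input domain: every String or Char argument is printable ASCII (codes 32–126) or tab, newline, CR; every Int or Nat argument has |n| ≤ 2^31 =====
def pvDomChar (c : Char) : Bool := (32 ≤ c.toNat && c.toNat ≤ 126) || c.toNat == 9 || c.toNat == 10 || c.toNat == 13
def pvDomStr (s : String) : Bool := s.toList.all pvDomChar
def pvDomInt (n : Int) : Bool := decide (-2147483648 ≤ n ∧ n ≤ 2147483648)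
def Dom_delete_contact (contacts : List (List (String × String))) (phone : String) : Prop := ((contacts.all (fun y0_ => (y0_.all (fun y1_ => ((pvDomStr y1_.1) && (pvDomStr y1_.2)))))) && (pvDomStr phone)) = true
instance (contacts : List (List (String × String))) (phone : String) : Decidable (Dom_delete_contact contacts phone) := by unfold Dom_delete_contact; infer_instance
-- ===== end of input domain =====

-- B replaces A's find-then-enumerate-and-pop structure by one rebuild pass (kept-accumulator
-- plus a deleted flag, then contacts[:] = kept); return value only is proved equal — both
-- programs also mutate `contacts` identically (the list minus its first match).

-- ===== PORT A =====
-- dict[k] lookup on the association-list encoding (first match), shared primitive of both ports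
def dictGet? : List (String × String) → String → Option String
  | [], _ => none
  | (k, v) :: rest, key => if k == key then some v else dictGet? rest key

-- `contact["phone"]` raises KeyError on a dict without the key; the `none` branch
-- (Python's KeyError, excluded by Pre_) returns a junk value.
def find_by_phone : List (List (String × String)) → String → Option (List (String × String))
  | [], _ => none
  | c :: rest, phone =>
    match dictGet? c "phone" with
    | none => none            -- KeyError in Python (outside Pre_)
    | some v => if phone == v then some c else find_by_phone rest phone

-- A's second loop: enumerate, pop at the first match and return True; fall-through returns True.
def delete_loop_A : List (List (String × String)) → String → Bool
  | [], _ => true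
  | c :: rest, phone =>
    match dictGet? c "phone" with
    | none => false           -- KeyError in Python (outside Pre_, unreachable after a successful find)
    | some v => if phone == v then true else delete_loop_A rest phone

def delete_contact (contacts : List (List (String × String))) (phone : String) : Bool :=
  match find_by_phone contacts phone with
  | none => false
  | some _ => delete_loop_A contacts phone

-- ===== PORT B =====
-- B's single rebuild loop: state = (kept list, deleted flag); once deleted, the lookup is
-- short-circuited away. The kept list is carried faithfully though only the flag is returned.
def delete_loop_B : List (List (String × String)) → String → List (List (String × String)) → Bool → Bool
  | [], _, _, deleted => deleted
  | c :: rest, phone, kept, deleted =>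
    if deleted then delete_loop_B rest phone (kept ++ [c]) true
    else match dictGet? c "phone" with
      | none => false         -- KeyError in Python (outside Pre_)
      | some v => if phone == v then delete_loop_B rest phone kept true
                  else delete_loop_B rest phone (kept ++ [c]) false

def delete_contact_alt (contacts : List (List (String × String))) (phone : String) : Bool :=
  delete_loop_B contacts phone [] false

-- ===== PRECONDITION & SPEC =====
-- Pre_ excludes exactly the inputs where both Pythons raise KeyError: some contact scanned
-- before (or at) the first phone match lacks a "phone" key (stated with List.lookup, the
-- library's first-match association lookup).
def Pre_delete_contact (contacts : List (List (String × String))) (phone : String) : Prop :=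
  ∀ c ∈ contacts.takeWhile (fun c => c.lookup "phone" != some phone),
    (c.lookup "phone").isSome
instance (contacts : List (List (String × String))) (phone : String) : Decidable (Pre_delete_contact contacts phone) := by unfold Pre_delete_contact; infer_instance

def pvWitness_delete_contact : (List (List (String × String))) × String :=
  ([[("name", "Ann"), ("phone", "123")], [("phone", "456")]], "456")

def Spec_delete_contact (contacts : List (List (String × String))) (phone : String) (out : Bool) : Prop := out = delete_contact_alt contacts phone
instance (contacts : List (List (String × String))) (phone : String) (out : Bool) : Decidable (Spec_delete_contact contacts phone out) := by unfold Spec_delete_contact; infer_instance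

-- ===== CLAIM (what is proved, stated in full; the proofs are below) =====
def Claim_equal_delete_contact : Prop := ∀ (contacts : List (List (String × String))) (phone : String), Dom_delete_contact contacts phone → Pre_delete_contact contacts phone → Spec_delete_contact contacts phone (delete_contact contacts phone)

-- ===== LEMMAS AND PROOFS =====

-- Once the flag is set, B's loop returns true regardless of the remaining input.
theorem loopB_deleted (l : List (List (String × String))) (phone : String)
    (kept : List (List (String × String))) : delete_loop_B l phone kept true = true := by
  induction l generalizing kept with
  | nil => rfl
  | cons c rest ih => simpa [delete_loop_B] using ih (kept ++ [c])

-- The returned flag does not depend on the kept accumulator.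
theorem loopB_kept_irrel (l : List (List (String × String))) (phone : String)
    (kept kept' : List (List (String × String))) (d : Bool) :
    delete_loop_B l phone kept d = delete_loop_B l phone kept' d := by
  induction l generalizing kept kept' d with
  | nil => rfl
  | cons c rest ih =>
    cases d with
    | true => simp [delete_loop_B, ih (kept ++ [c]) (kept' ++ [c])]
    | false =>
      simp only [delete_loop_B, Bool.false_eq_true, if_false]
      cases dictGet? c "phone" with
      | none => rfl
      | some v =>
        by_cases hv : phone == v
        · simp [hv, ih kept kept']
        · simp [hv, ih (kept ++ [c]) (kept' ++ [c])]

-- The agreement in fact holds for every input (both ports return `false` on the KeyError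
-- branches in compatible ways); Pre_ only marks where the Pythons return at all.
theorem delete_eq_alt (contacts : List (List (String × String))) (phone : String) :
    delete_contact contacts phone = delete_contact_alt contacts phone := by
  induction contacts with
  | nil => rfl
  | cons c rest ih =>
    unfold delete_contact find_by_phone delete_loop_A delete_contact_alt delete_loop_B
    cases h : dictGet? c "phone" with
    | none => simp
    | some v =>
      by_cases hv : phone == v
      · simp [hv, loopB_deleted]
      · simp only [hv, Bool.false_eq_true, if_false]
        rw [loopB_kept_irrel rest phone ([] ++ [c]) [],
            show delete_loop_B rest phone [] false = delete_contact_alt rest phone from rfl, ← ih]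
        rfl

-- ===== VERDICT (by name: the statement is the Claim_ definition above) =====
theorem delete_contact_spec : Claim_equal_delete_contact := by
  intro contacts phone _ _
  exact delete_eq_alt contacts phone
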